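-- pv_equiv track=rewrite | github.com/kropachev/kropachev | scripts/telegram-exporter/export_telegram_to_hugo.py | insert_dividers
-- ===== SOURCE A (Python) =====
-- from typing import Iterable, List, Optional, Tuple
--
-- def insert_dividers(body: str) -> str:
--     """
--     Вставляет разделитель '---' только между абзацами, когда:
--     — предыдущая непустая строка НЕ является заголовком (не начинается с '#'), и
--     — следующая непустая строка НЕ является заголовком.
--     Во всех остальных случаях последовательность пустых строк сохраняется как есть.
--     """
--     if not body:
--         return ""
--
--     lines = body.splitlines()
--     out: List[str] = []
--     i = 0
--
--     def is_header(s: str) -> bool: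
--         return s.lstrip().startswith("#")
--
--     while i < len(lines):
--         if lines[i].strip() != "":
--             out.append(lines[i])
--             i += 1
--             continue
--
--         # Последовательность пустых строк
--         start = i
--         while i < len(lines) and lines[i].strip() == "":
--             i += 1
--
--         # Ищем соседние непустые строки
--         prev_nonempty = None
--         for j in range(len(out) - 1, -1, -1):
--             if out[j].strip() != "":
--                 prev_nonempty = out[j]
--                 break
--         next_nonempty = lines[i] if i < len(lines) else None
--
--         if (
--             prev_nonempty is not None
--             and next_nonempty is not None
--             and not is_header(prev_nonempty)
--             and not is_header(next_nonempty)
--         ):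
--             # Стандартизированная вставка разделителя
--             out.append("")
--             out.append("---")
--             out.append("")
--         else:
--             # Сохраняем исходное количество пустых строк
--             out.extend(lines[start:i])
--
--     return "\n".join(out)
-- ===== SOURCE B (Python) =====
-- from typing import List, Optional, Tuple
--
--
-- def _is_header(s: str) -> bool:
--     return s.lstrip().startswith("#")
--
--
-- def insert_dividers(body: str) -> str:
--     if not body:
--         return ""
--
--     lines = body.splitlines()
--
--     # Phase 1: split the lines into maximal runs ("blocks") of blank
--     # (whitespace-only) and non-blank lines.
--     blocks: List[Tuple[bool, List[str]]] = []
--     j = 0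
--     while j < len(lines):
--         blank = lines[j].strip() == ""
--         k = j
--         while k < len(lines) and (lines[k].strip() == "") == blank:
--             k += 1
--         blocks.append((blank, lines[j : k]))
--         j = k
--
--     # Phase 2: a blank block becomes a standardized divider exactly when a
--     # non-blank block precedes it and a non-blank block follows it, and
--     # neither the last preceding nor the first following line is a header.
--     out: List[str] = []
--     prev_last: Optional[str] = None
--     idx = 0
--     while idx < len(blocks):
--         blank, grp = blocks[idx]
--         if not blank:
--             out.extend(grp)
--             prev_last = grp[-1]
--         elif (
--             prev_last is not None
--             and idx + 1 < len(blocks)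
--             and not _is_header(prev_last)
--             and not _is_header(blocks[idx + 1][1][0])
--         ):
--             out.extend(["", "---", ""])
--         else:
--             out.extend(grp)
--         idx += 1
--
--     return "\n".join(out)
-- ===== Notes on version B (the rewrite author's own statement) =====
-- stated objective: alternative
-- what changed: B first partitions the lines into maximal blank/non-blank blocks and then decides each blank block from its neighbouring blocks with a maintained prev_last variable, instead of A's line-indexed loop that rescans the output list backwards for the previous non-empty line at every blank run.
import Mathlib
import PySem

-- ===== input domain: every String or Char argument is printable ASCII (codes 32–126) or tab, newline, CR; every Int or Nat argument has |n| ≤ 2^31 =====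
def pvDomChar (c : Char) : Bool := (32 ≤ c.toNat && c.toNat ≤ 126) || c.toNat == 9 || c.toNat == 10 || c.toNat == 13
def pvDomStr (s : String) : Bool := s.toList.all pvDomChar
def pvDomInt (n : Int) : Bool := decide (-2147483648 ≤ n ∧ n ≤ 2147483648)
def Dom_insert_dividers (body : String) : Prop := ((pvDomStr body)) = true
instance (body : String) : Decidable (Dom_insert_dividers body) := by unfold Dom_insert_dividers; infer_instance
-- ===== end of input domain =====

-- B groups the lines into maximal blank/non-blank blocks first and then decides each
-- blank block from its neighbouring blocks (alternative decomposition, same cost).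

-- shared helpers (identical helper code in both Pythons)
def pvBlank (s : String) : Bool := PySem.Str.strip s == ""
def pvIsHeader (s : String) : Bool := PySem.Str.startswith (PySem.Str.lstrip s) "#"

-- ===== PORT A =====
-- A's backward `for j in range(len(out)-1, -1, -1)` rescan: the first line from the
-- end of `out` whose strip is non-empty.
def pvPrevNonempty (out : List String) : Option String :=
  out.reverse.find? (fun s => !pvBlank s)

-- A's while-loop over the line index; the inner blank-consuming while is takeWhile/dropWhile.
def pvLoopA (out : List String) (lines : List String) : List String :=
  match lines with
  | [] => out
  | l :: ls =>
    if h : pvBlank l = false then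
      pvLoopA (out ++ [l]) ls
    else
      let blanks := (l :: ls).takeWhile pvBlank
      let rest := (l :: ls).dropWhile pvBlank
      let prev := pvPrevNonempty out
      let next := rest.head?
      match prev, next with
      | some p, some n =>
        if !pvIsHeader p && !pvIsHeader n then pvLoopA (out ++ ["", "---", ""]) rest
        else pvLoopA (out ++ blanks) rest
      | _, _ => pvLoopA (out ++ blanks) rest
termination_by lines.length
decreasing_by
  · simp
  all_goals
    have hb : pvBlank l = true := by revert h; cases pvBlank l <;> simp
    simp only [List.dropWhile_cons_of_pos hb, List.length_cons]
    exact Nat.lt_succ_of_le (List.length_dropWhile_le pvBlank ls)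

def insert_dividers (body : String) : String :=
  if body == "" then ""
  else PySem.Str.join "\n" (pvLoopA [] (PySem.Str.splitlines body))

-- ===== PORT B =====
-- Phase 1 of B: split the lines into maximal runs of equal blankness.
def pvGroup (lines : List String) : List (Bool × List String) :=
  match lines with
  | [] => []
  | l :: ls =>
    (pvBlank l, (l :: ls).takeWhile (fun s => pvBlank s == pvBlank l))
      :: pvGroup ((l :: ls).dropWhile (fun s => pvBlank s == pvBlank l))
termination_by lines.length
decreasing_by
  have h1 : List.dropWhile (fun s => pvBlank s == pvBlank l) (l :: ls)
      = List.dropWhile (fun s => pvBlank s == pvBlank l) ls :=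
    List.dropWhile_cons_of_pos (by simp)
  rw [h1]
  simp only [List.length_cons]
  exact Nat.lt_succ_of_le (List.length_dropWhile_le _ ls)

-- Phase 2 of B: blocks[idx+1] of the Python loop is the head of the remaining list.
def pvEmitB (prevLast : Option String) (blocks : List (Bool × List String)) : List String :=
  match blocks with
  | [] => []
  | (blank, grp) :: rest =>
    if blank = false then
      grp ++ pvEmitB grp.getLast? rest
    else
      match prevLast, rest with
      | some p, (_, ng) :: _ =>
        if !pvIsHeader p && !pvIsHeader (ng.headD "") then
          ["", "---", ""] ++ pvEmitB prevLast rest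
        else grp ++ pvEmitB prevLast rest
      | _, _ => grp ++ pvEmitB prevLast rest

def insert_dividers_alt (body : String) : String :=
  if body == "" then ""
  else PySem.Str.join "\n" (pvEmitB none (pvGroup (PySem.Str.splitlines body)))

-- ===== PRECONDITION & SPEC =====
def Spec_insert_dividers (body : String) (out : String) : Prop := out = insert_dividers_alt body
instance (body : String) (out : String) : Decidable (Spec_insert_dividers body out) := by unfold Spec_insert_dividers; infer_instance

-- ===== CLAIM (what is proved, stated in full; the proofs are below) =====
def Claim_equal_insert_dividers : Prop := ∀ (body : String), Dom_insert_dividers body → Spec_insert_dividers body (insert_dividers body)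

-- ===== LEMMAS AND PROOFS =====

theorem pvFind?_all_true {α : Type} (p : α → Bool) (l : List α)
    (h : ∀ x ∈ l, p x = true) : l.find? p = l.head? := by
  cases l with
  | nil => rfl
  | cons a l => simp [List.find?, h a (by simp)]

theorem pvPrevNonempty_append_blank (out run : List String)
    (h : ∀ s ∈ run, pvBlank s = true) : pvPrevNonempty (out ++ run) = pvPrevNonempty out := by
  unfold pvPrevNonempty
  rw [List.reverse_append, List.find?_append]
  have : run.reverse.find? (fun s => !pvBlank s) = none := by
    rw [List.find?_eq_none]
    intro x hx
    simp [h x (List.mem_reverse.mp hx)]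
  simp [this]

theorem pvPrevNonempty_append_nonblank (out run : List String) (hne : run ≠ [])
    (h : ∀ s ∈ run, pvBlank s = false) : pvPrevNonempty (out ++ run) = run.getLast? := by
  unfold pvPrevNonempty
  rw [List.reverse_append, List.find?_append]
  have : run.reverse.find? (fun s => !pvBlank s) = run.reverse.head? := by
    apply pvFind?_all_true
    intro x hx
    simp [h x (List.mem_reverse.mp hx)]
  rw [this, List.head?_reverse]
  cases hr : run.getLast? with
  | none => exact absurd (List.getLast?_eq_none_iff.mp hr) hne
  | some a => simp

theorem pvDropWhile_head {α : Type} (p : α → Bool) (l : List α) (x : α) (xs : List α)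
    (h : l.dropWhile p = x :: xs) : p x = false := by
  induction l with
  | nil => simp at h
  | cons a l ih =>
    by_cases ha : p a = true
    · rw [List.dropWhile_cons_of_pos ha] at h; exact ih h
    · rw [List.dropWhile_cons_of_neg ha] at h
      injection h with h1 _
      subst h1
      simp at ha
      exact ha

-- consuming a run of non-blank lines: A appends them one by one
theorem pvLoopA_run (run : List String) (h : ∀ s ∈ run, pvBlank s = false) :
    ∀ out rest, pvLoopA out (run ++ rest) = pvLoopA (out ++ run) rest := by
  induction run with
  | nil => simp
  | cons r run ih =>
    intro out rest
    have hr : pvBlank r = false := h r (by simp)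
    rw [List.cons_append, pvLoopA]
    simp only [hr]
    rw [ih (fun s hs => h s (by simp [hs])) (out ++ [r]) rest]
    simp

-- one-step unfoldings of pvEmitB (its compiled match needs literal constructors)
theorem pvEmitB_nonblank (pl : Option String) (grp : List String)
    (rest : List (Bool × List String)) :
    pvEmitB pl ((false, grp) :: rest) = grp ++ pvEmitB grp.getLast? rest := rfl

theorem pvEmitB_blank_nil (pl : Option String) (grp : List String) :
    pvEmitB pl [(true, grp)] = grp := by
  cases pl <;> simp [pvEmitB]

theorem pvEmitB_blank_none (grp ng : List String) (b2 : Bool)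
    (rest : List (Bool × List String)) :
    pvEmitB none ((true, grp) :: (b2, ng) :: rest)
      = grp ++ pvEmitB none ((b2, ng) :: rest) := rfl

theorem pvEmitB_blank_some_cons (p : String) (grp ng : List String) (b2 : Bool)
    (rest : List (Bool × List String)) :
    pvEmitB (some p) ((true, grp) :: (b2, ng) :: rest)
      = if !pvIsHeader p && !pvIsHeader (ng.headD "")
        then ["", "---", ""] ++ pvEmitB (some p) ((b2, ng) :: rest)
        else grp ++ pvEmitB (some p) ((b2, ng) :: rest) := rfl

theorem pvLoopA_nil (out : List String) : pvLoopA out [] = out := by rw [pvLoopA]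

-- the key invariant: A's loop with `out` accumulated equals B's block pass,
-- where A's backward rescan result is B's maintained prev_last.
theorem pvKey : ∀ (n : Nat) (lines : List String), lines.length ≤ n →
    ∀ out, pvLoopA out lines = out ++ pvEmitB (pvPrevNonempty out) (pvGroup lines) := by
  intro n
  induction n with
  | zero =>
    intro lines hl out
    have h0 : lines = [] := List.eq_nil_of_length_eq_zero (Nat.le_zero.mp hl)
    subst h0
    simp [pvLoopA, pvGroup, pvEmitB]
  | succ n ih =>
    intro lines hl out
    match lines with
    | [] => simp [pvLoopA, pvGroup, pvEmitB]
    | l :: ls =>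
      have hls : ls.length ≤ n := by simpa using hl
      by_cases hb : pvBlank l = false
      · -- l is non-blank: A consumes the whole non-blank run line by line
        have hg : pvGroup (l :: ls) =
            (false, (l :: ls).takeWhile (fun s => pvBlank s == false))
              :: pvGroup ((l :: ls).dropWhile (fun s => pvBlank s == false)) := by
          rw [pvGroup]; simp only [hb]
        set run := (l :: ls).takeWhile (fun s => pvBlank s == false) with hrun
        set rest := (l :: ls).dropWhile (fun s => pvBlank s == false) with hrest
        have hrunall : ∀ s ∈ run, pvBlank s = false := by
          intro s hs
          simpa using List.mem_takeWhile_imp hs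
        have hsplit : run ++ rest = l :: ls := List.takeWhile_append_dropWhile
        have hruncons : run = l :: ls.takeWhile (fun s => pvBlank s == false) := by
          rw [hrun, List.takeWhile_cons_of_pos (by simp [hb])]
        have hrestls : rest = ls.dropWhile (fun s => pvBlank s == false) := by
          rw [hrest, List.dropWhile_cons_of_pos (by simp [hb])]
        have hrlen : rest.length ≤ n :=
          le_trans (hrestls ▸ List.length_dropWhile_le _ ls) hls
        calc pvLoopA out (l :: ls)
            = pvLoopA out (run ++ rest) := by rw [hsplit]
          _ = pvLoopA (out ++ run) rest := pvLoopA_run run hrunall out rest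
          _ = (out ++ run) ++ pvEmitB (pvPrevNonempty (out ++ run)) (pvGroup rest) :=
              ih rest hrlen (out ++ run)
          _ = out ++ pvEmitB (pvPrevNonempty out) (pvGroup (l :: ls)) := by
              rw [pvPrevNonempty_append_nonblank out run (by simp [hruncons]) hrunall, hg,
                pvEmitB_nonblank]
              simp [List.append_assoc]
      · -- l is blank: A consumes the blank run at once
        have hbt : pvBlank l = true := by revert hb; cases pvBlank l <;> simp
        have hfun : (fun s : String => pvBlank s == true) = pvBlank := by
          funext s; cases pvBlank s <;> simp
        have hg : pvGroup (l :: ls) =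
            (true, (l :: ls).takeWhile pvBlank)
              :: pvGroup ((l :: ls).dropWhile pvBlank) := by
          rw [pvGroup]; simp only [hbt, hfun]
        set run := (l :: ls).takeWhile pvBlank with hrun
        set rest := (l :: ls).dropWhile pvBlank with hrest
        have hrunall : ∀ s ∈ run, pvBlank s = true := fun s hs => List.mem_takeWhile_imp hs
        have hrestls : rest = ls.dropWhile pvBlank := by
          rw [hrest, List.dropWhile_cons_of_pos hbt]
        have hrlen : rest.length ≤ n :=
          le_trans (hrestls ▸ List.length_dropWhile_le _ ls) hls
        have hprevrun : pvPrevNonempty (out ++ run) = pvPrevNonempty out :=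
          pvPrevNonempty_append_blank out run hrunall
        have hL : pvLoopA out (l :: ls) =
            match pvPrevNonempty out, rest.head? with
            | some p, some nx =>
              if !pvIsHeader p && !pvIsHeader nx then pvLoopA (out ++ ["", "---", ""]) rest
              else pvLoopA (out ++ run) rest
            | _, _ => pvLoopA (out ++ run) rest := by
          rw [pvLoopA, dif_neg (by simp [hbt])]
        rw [hg]
        cases hrc : rest with
        | nil =>
          have hhead : rest.head? = none := by rw [hrc]; rfl
          cases hpv : pvPrevNonempty out with
          | none =>
            rw [show pvLoopA out (l :: ls) = pvLoopA (out ++ run) rest from by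
              rw [hL, hhead, hpv]]
            rw [hrc, pvLoopA_nil, pvGroup, pvEmitB_blank_nil]
          | some p =>
            rw [show pvLoopA out (l :: ls) = pvLoopA (out ++ run) rest from by
              rw [hL, hhead, hpv]]
            rw [hrc, pvLoopA_nil, pvGroup, pvEmitB_blank_nil]
        | cons x rs =>
          have hhead : rest.head? = some x := by rw [hrc]; rfl
          have hx : pvBlank x = false := pvDropWhile_head pvBlank (l :: ls) x rs (hrest ▸ hrc)
          have hg2 : pvGroup (x :: rs) =
              (false, (x :: rs).takeWhile (fun s => pvBlank s == false))
                :: pvGroup ((x :: rs).dropWhile (fun s => pvBlank s == false)) := by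
            rw [pvGroup]; simp only [hx]
          set run2 := (x :: rs).takeWhile (fun s => pvBlank s == false) with hrun2
          set rest2 := (x :: rs).dropWhile (fun s => pvBlank s == false) with hrest2
          have hrun2all : ∀ s ∈ run2, pvBlank s = false := by
            intro s hs
            simpa using List.mem_takeWhile_imp hs
          have hsplit2 : run2 ++ rest2 = x :: rs := List.takeWhile_append_dropWhile
          have hrun2cons : run2 = x :: rs.takeWhile (fun s => pvBlank s == false) := by
            rw [hrun2, List.takeWhile_cons_of_pos (by simp [hx])]
          have hhd2 : run2.headD "" = x := by rw [hrun2cons]; rfl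
          have hr2len : rest2.length ≤ n := by
            have h1 : rest2.length ≤ rs.length := by
              rw [hrest2, List.dropWhile_cons_of_pos (by simp [hx])]
              exact List.length_dropWhile_le _ rs
            have h2 : rest.length ≤ ls.length := hrestls ▸ List.length_dropWhile_le _ ls
            rw [hrc] at h2
            simp only [List.length_cons] at h2
            omega
          cases hpv : pvPrevNonempty out with
          | none =>
            rw [show pvLoopA out (l :: ls) = pvLoopA (out ++ run) rest from by
              rw [hL, hhead, hpv]]
            rw [ih rest hrlen (out ++ run), hprevrun, hpv, hrc, hg2,
              pvEmitB_blank_none]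
            simp [List.append_assoc]
          | some p =>
            by_cases hcond : (!pvIsHeader p && !pvIsHeader x) = true
            · -- divider inserted by both
              rw [show pvLoopA out (l :: ls) = pvLoopA (out ++ ["", "---", ""]) rest from by
                rw [hL, hhead, hpv]; exact if_pos hcond]
              rw [hrc, ← hsplit2, pvLoopA_run run2 hrun2all,
                ih rest2 hr2len ((out ++ ["", "---", ""]) ++ run2),
                pvPrevNonempty_append_nonblank _ run2 (by simp [hrun2cons]) hrun2all,
                hsplit2, hg2, pvEmitB_blank_some_cons]
              rw [hhd2, if_pos hcond, pvEmitB_nonblank]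
              simp [List.append_assoc]
            · -- blank run kept by both
              rw [show pvLoopA out (l :: ls) = pvLoopA (out ++ run) rest from by
                rw [hL, hhead, hpv]; exact if_neg hcond]
              rw [ih rest hrlen (out ++ run), hprevrun, hpv, hrc, hg2,
                pvEmitB_blank_some_cons]
              rw [hhd2, if_neg hcond]
              simp [List.append_assoc]

-- ===== VERDICT (by name: the statement is the Claim_ definition above) =====
theorem insert_dividers_spec : Claim_equal_insert_dividers := by
  intro body _
  unfold Spec_insert_dividers insert_dividers insert_dividers_alt
  by_cases hb : body == ""
  · simp [hb]
  · simp only [hb]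
    rw [pvKey (PySem.Str.splitlines body).length _ le_rfl []]
    rfl
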